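-- pv_equiv track=rewrite | github.com/TheoHorn/advent-of-code | 2023/14/golden_star.py | update_north
-- ===== SOURCE A (Python) =====
-- def update_north(column):
--     last_block = -1
--     for j in range(len(column)):
--         if column[j] == '#':
--             last_block = j
--         if column[j] == 'O':
--             if j > last_block+1:
--                 column = column[:last_block+1] + 'O' + column[last_block + 2:]
--                 column = column[:j] + '.' + column[j + 1:]
--                 last_block +=1
--             else:
--                 last_block = j
--     return column
-- ===== SOURCE B (Python) =====
-- def update_north(column):
--     parts = []
--     for seg in column.split('#'):
--         k = seg.count('O')
--         parts.append('O' * k + seg[k:].replace('O', '.'))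
--     return '#'.join(parts)
-- ===== Notes on version B (the rewrite author's own statement) =====
-- stated objective: faster
-- what changed: Replaced the quadratic index loop that repeatedly rebuilds the whole string by slicing with a split-on-'#' pass: each '#'-free segment becomes 'O'*count + the remainder with 'O' replaced by '.', joined back with '#'.
import Mathlib
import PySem

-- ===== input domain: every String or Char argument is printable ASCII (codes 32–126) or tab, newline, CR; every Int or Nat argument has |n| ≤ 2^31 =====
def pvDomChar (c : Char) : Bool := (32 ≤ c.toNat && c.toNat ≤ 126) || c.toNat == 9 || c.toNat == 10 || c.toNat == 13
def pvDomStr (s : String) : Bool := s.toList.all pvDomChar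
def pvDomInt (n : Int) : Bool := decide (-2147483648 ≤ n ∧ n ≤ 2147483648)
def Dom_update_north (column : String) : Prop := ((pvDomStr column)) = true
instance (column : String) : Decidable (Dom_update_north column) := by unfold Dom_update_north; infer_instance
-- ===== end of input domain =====

-- B replaces A's quadratic slice-rebuilding index loop by one split-on-'#' pass
-- (each segment becomes 'O'*count + rest with 'O'→'.', re-joined with '#'); return value only.

-- ===== PORT A =====
def update_north (column : String) : String :=
  let xs := column.toList
  let res := (PySem.List.pyRange 0 (xs.length : Int) 1).foldl
    (fun (st : List Char × Int) (j : Int) =>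
      let col := st.1
      let lb := st.2
      let lb := if PySem.List.pyGet? col j = some '#' then j else lb
      if PySem.List.pyGet? col j = some 'O' then
        if j > lb + 1 then
          let col2 := PySem.List.slice col none (some (lb + 1)) ++ ['O'] ++
                      PySem.List.slice col (some (lb + 2)) none
          let col3 := PySem.List.slice col2 none (some j) ++ ['.'] ++
                      PySem.List.slice col2 (some (j + 1)) none
          (col3, lb + 1)
        else (col, j)
      else (col, lb)) (xs, -1)
  String.mk res.1

-- ===== PORT B =====
def update_north_alt (column : String) : String :=
  let parts := (PySem.Chars.splitOn column.toList ['#']).foldl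
    (fun (ps : List (List Char)) (seg : List Char) =>
      let k := PySem.Chars.count seg ['O']
      ps ++ [PySem.List.pyRepeat ['O'] (k : Int) ++
             PySem.Chars.replace (PySem.List.slice seg (some (k : Int)) none) ['O'] ['.']]) []
  String.mk (PySem.Chars.join ['#'] parts)

-- ===== PRECONDITION & SPEC =====
def Spec_update_north (column : String) (out : String) : Prop := out = update_north_alt column
instance (column : String) (out : String) : Decidable (Spec_update_north column out) := by unfold Spec_update_north; infer_instance

-- ===== CLAIM (what is proved, stated in full; the proofs are below) =====
def Claim_equal_update_north : Prop := ∀ (column : String), Dom_update_north column → Spec_update_north column (update_north column)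

-- ===== LEMMAS AND PROOFS =====

-- '.'-ing of a char: what landing/moved-away positions look like
def pvDot (c : Char) : Char := if c = 'O' then '.' else c

-- transform of one '#'-free segment
def pvSegT (s : List Char) : List Char :=
  List.replicate (s.count 'O') 'O' ++ (s.drop (s.count 'O')).map pvDot

-- reference split on '#'
def pvSplit : List Char → List (List Char)
  | [] => [[]]
  | c :: rest => if c = '#' then [] :: pvSplit rest else (pvSplit rest).modifyHead (c :: ·)

-- reference join with '#'
def pvJoin : List (List Char) → List Char
  | [] => []
  | [x] => x
  | x :: y :: l => x ++ '#' :: pvJoin (y :: l)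

-- the common one-pass model: output built left to right plus a write pointer
def pvStep (st : List Char × Nat) (c : Char) : List Char × Nat :=
  if c = '#' then (st.1 ++ [c], st.1.length + 1)
  else if c = 'O' then ((st.1 ++ ['.']).set st.2 'O', st.2 + 1)
  else (st.1 ++ [c], st.2)

theorem pvSplit_ne_nil (xs : List Char) : pvSplit xs ≠ [] := by
  cases xs with
  | nil => simp [pvSplit]
  | cons c rest =>
    simp only [pvSplit]
    split
    · simp
    · cases h : pvSplit rest with
      | nil => exact absurd h (pvSplit_ne_nil rest)
      | cons a l => simp [List.modifyHead]

theorem pvSegT_snoc_O (s : List Char) :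
    (pvSegT s ++ ['.']).set (s.count 'O') 'O' = pvSegT (s ++ ['O']) := by
  have hk := List.count_le_length (l := s) (a := 'O')
  rw [pvSegT, List.append_assoc, List.set_append_right _ _ (by simp),
    List.length_replicate, Nat.sub_self]
  rw [show pvSegT (s ++ ['O']) = List.replicate (s.count 'O' + 1) 'O' ++
      ((s ++ ['O']).drop (s.count 'O' + 1)).map pvDot by simp [pvSegT]]
  rcases hd : s.drop (s.count 'O') with _ | ⟨d, q⟩
  · have hlen : s.length = s.count 'O' := by
      have := congrArg List.length hd
      simp [List.length_drop] at this
      omega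
    have h2 : (s ++ ['O']).drop (s.count 'O' + 1) = [] :=
      List.drop_eq_nil_of_le (by simp [hlen])
    simp [h2, List.replicate_succ' (n := s.count 'O')]
  · have hklt : s.count 'O' < s.length := by
      have := congrArg List.length hd
      simp [List.length_drop] at this
      omega
    have htl : s.drop (s.count 'O' + 1) = q := by
      have := congrArg List.tail hd
      simpa [List.tail_drop] using this
    have h2 : (s ++ ['O']).drop (s.count 'O' + 1) = q ++ ['O'] := by
      rw [List.drop_append_of_le_length (by omega), htl]
    simp [h2, List.replicate_succ' (n := s.count 'O'), pvDot]

theorem pvSegT_snoc_other (s : List Char) (c : Char) (hO : c ≠ 'O') :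
    pvSegT (s ++ [c]) = pvSegT s ++ [c] := by
  have hk := List.count_le_length (l := s) (a := 'O')
  have hcnt : (s ++ [c]).count 'O' = s.count 'O' := by
    simp [List.count_append, List.count_singleton]
    intro h; exact hO h
  simp only [pvSegT, hcnt, List.drop_append_of_le_length (by omega : s.count 'O' ≤ s.length)]
  simp [pvDot, hO]

theorem pvCount_snoc_O (s : List Char) : (s ++ ['O']).count 'O' = s.count 'O' + 1 := by simp

theorem pvCount_snoc_other (s : List Char) (c : Char) (hO : c ≠ 'O') :
    (s ++ [c]).count 'O' = s.count 'O' := by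
  simp [List.count_append, List.count_singleton]
  intro h; exact hO h

theorem pvModel_eq_join (xs : List Char) : ∀ (b s : List Char),
    (xs.foldl pvStep (b ++ pvSegT s, b.length + s.count 'O')).1 =
      b ++ pvJoin (((pvSplit xs).modifyHead (s ++ ·)).map pvSegT) := by
  induction xs with
  | nil =>
    intro b s
    simp [pvSplit, pvJoin, List.modifyHead]
  | cons c rest ih =>
    intro b s
    by_cases hH : c = '#'
    · subst hH
      have hstep : pvStep (b ++ pvSegT s, b.length + s.count 'O') '#' =
          ((b ++ pvSegT s ++ ['#']) ++ pvSegT [], (b ++ pvSegT s ++ ['#']).length +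
            ([] : List Char).count 'O') := by
        have hk := List.count_le_length (l := s) (a := 'O')
        simp [pvStep, pvSegT]
        omega
      rw [List.foldl_cons, hstep, ih (b ++ pvSegT s ++ ['#']) []]
      rcases h : pvSplit rest with _ | ⟨p, l⟩
      · exact absurd h (pvSplit_ne_nil rest)
      · simp [pvSplit, h, List.modifyHead, pvJoin]
    · by_cases hO : c = 'O'
      · subst hO
        have hstep : pvStep (b ++ pvSegT s, b.length + s.count 'O') 'O' =
            (b ++ pvSegT (s ++ ['O']), b.length + (s ++ ['O']).count 'O') := by
          have h1 : (b ++ (pvSegT s ++ ['.'])).set (b.length + s.count 'O') 'O' =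
              b ++ pvSegT (s ++ ['O']) := by
            rw [List.set_append_right _ _ (by omega), Nat.add_sub_cancel_left, pvSegT_snoc_O]
          simp [pvStep, h1, pvCount_snoc_O, Nat.add_assoc]
        rw [List.foldl_cons, hstep, ih b (s ++ ['O'])]
        rcases h : pvSplit rest with _ | ⟨p, l⟩
        · exact absurd h (pvSplit_ne_nil rest)
        · simp [pvSplit, h, List.modifyHead]
      · have hstep : pvStep (b ++ pvSegT s, b.length + s.count 'O') c =
            (b ++ pvSegT (s ++ [c]), b.length + (s ++ [c]).count 'O') := by
          simp [pvStep, hH, hO, pvSegT_snoc_other s c hO, pvCount_snoc_other s c hO]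
        rw [List.foldl_cons, hstep, ih b (s ++ [c])]
        rcases h : pvSplit rest with _ | ⟨p, l⟩
        · exact absurd h (pvSplit_ne_nil rest)
        · simp [pvSplit, h, hH, List.modifyHead]

theorem pvModel_run (xs : List Char) :
    (xs.foldl pvStep ([], 0)).1 = pvJoin ((pvSplit xs).map pvSegT) := by
  have := pvModel_eq_join xs [] []
  simp only [pvSegT, List.count_nil, List.drop_nil, List.map_nil, List.replicate_zero,
    List.append_nil, List.nil_append, List.length_nil] at this
  rw [this]
  congr 1
  rcases h : pvSplit xs with _ | ⟨p, l⟩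
  · exact absurd h (pvSplit_ne_nil xs)
  · simp [List.modifyHead]

-- PySem.Chars.count with a single-character needle is List.count
theorem pvCountGo (c : Char) : ∀ (l : List Char) (fuel acc : Nat), l.length ≤ fuel →
    PySem.Chars.count.go [c] fuel l acc = acc + l.count c := by
  intro l
  induction l with
  | nil => intro fuel acc _; cases fuel <;> simp [PySem.Chars.count.go]
  | cons x t ih =>
    intro fuel acc hf
    cases fuel with
    | zero => simp at hf
    | succ fuel =>
      simp only [PySem.Chars.count.go]
      by_cases hx : c = x
      · subst hx
        rw [if_pos (by simp [List.isPrefixOf])]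
        simp only [List.length_cons, List.length_nil, List.drop_succ_cons, List.drop_zero]
        rw [ih fuel (acc + 1) (by simpa using hf)]
        simp [List.count_cons]
        omega
      · rw [if_neg (by simp [List.isPrefixOf]; exact fun h => hx h)]
        rw [ih fuel acc (by simpa using hf)]
        simp [List.count_cons]
        intro h; exact hx h.symm

theorem pvCount_eq (s : List Char) (c : Char) :
    PySem.Chars.count s [c] = s.count c := by
  simp only [PySem.Chars.count, List.isEmpty_cons, if_neg Bool.false_ne_true]
  simpa using pvCountGo c s s.length 0 le_rfl

-- PySem.Chars.replace with single-character old/new is a map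
theorem pvReplaceGo : ∀ (l : List Char) (fuel : Nat) (acc : List Char), l.length ≤ fuel →
    PySem.Chars.replace.go ['O'] ['.'] fuel l acc = acc.reverse ++ l.map pvDot := by
  intro l
  induction l with
  | nil => intro fuel acc _; cases fuel <;> simp [PySem.Chars.replace.go]
  | cons x t ih =>
    intro fuel acc hf
    cases fuel with
    | zero => simp at hf
    | succ fuel =>
      simp only [PySem.Chars.replace.go]
      by_cases hx : x = 'O'
      · subst hx
        rw [if_pos (by simp [List.isPrefixOf])]
        simp only [List.length_cons, List.length_nil, List.drop_succ_cons, List.drop_zero]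
        rw [ih fuel _ (by simpa using hf)]
        simp [pvDot]
      · rw [if_neg (by simp [List.isPrefixOf]; exact fun h => hx h.symm)]
        rw [ih fuel _ (by simpa using hf)]
        simp [pvDot, hx]

theorem pvReplace_eq (s : List Char) :
    PySem.Chars.replace s ['O'] ['.'] = s.map pvDot := by
  simp only [PySem.Chars.replace, List.isEmpty_cons, if_neg Bool.false_ne_true]
  simpa using pvReplaceGo s s.length [] le_rfl

-- PySem.Chars.splitOn with a single-character separator is pvSplit
theorem pvSplitGo : ∀ (l : List Char) (fuel : Nat) (cur : List Char) (acc : List (List Char)),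
    l.length ≤ fuel →
    PySem.Chars.splitOn.go ['#'] fuel l cur acc =
      acc.reverse ++ (pvSplit l).modifyHead (cur.reverse ++ ·) := by
  intro l
  induction l with
  | nil =>
    intro fuel cur acc _
    cases fuel <;> simp [PySem.Chars.splitOn.go, pvSplit, List.modifyHead]
  | cons x t ih =>
    intro fuel cur acc hf
    cases fuel with
    | zero => simp at hf
    | succ fuel =>
      simp only [PySem.Chars.splitOn.go]
      by_cases hx : x = '#'
      · subst hx
        rw [if_pos (by simp [List.isPrefixOf])]
        simp only [List.length_cons, List.length_nil, List.drop_succ_cons, List.drop_zero]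
        rw [ih fuel [] _ (by simpa using hf)]
        rcases h : pvSplit t with _ | ⟨p, l'⟩
        · exact absurd h (pvSplit_ne_nil t)
        · simp [pvSplit, h, List.modifyHead]
      · rw [if_neg (by simp [List.isPrefixOf]; exact fun h => hx h.symm)]
        rw [ih fuel (x :: cur) acc (by simpa using hf)]
        rcases h : pvSplit t with _ | ⟨p, l'⟩
        · exact absurd h (pvSplit_ne_nil t)
        · simp [pvSplit, h, hx, List.modifyHead]

theorem pvSplitOn_eq (s : List Char) :
    PySem.Chars.splitOn s ['#'] = pvSplit s := by
  simp only [PySem.Chars.splitOn]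
  rw [pvSplitGo s (s.length + 1) [] [] (by omega)]
  rcases h : pvSplit s with _ | ⟨p, l⟩
  · exact absurd h (pvSplit_ne_nil s)
  · simp [List.modifyHead]

-- intercalate with ['#'] is pvJoin
theorem pvJoin_eq : ∀ (l : List (List Char)), PySem.Chars.join ['#'] l = pvJoin l := by
  intro l
  induction l with
  | nil => simp [PySem.Chars.join, pvJoin, List.intercalate]
  | cons x l ih =>
    cases l with
    | nil => simp [PySem.Chars.join, pvJoin, List.intercalate]
    | cons y l' =>
      have h : (['#'] : List Char).intercalate (x :: y :: l') =
          x ++ '#' :: (['#'] : List Char).intercalate (y :: l') := by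
        simp [List.intercalate, List.intersperse]
      simp only [PySem.Chars.join] at ih ⊢
      rw [h, ih, pvJoin]

-- B's port computes the model's output
theorem pvAlt_eq_model (column : String) :
    update_north_alt column = String.mk ((column.toList.foldl pvStep ([], 0)).1) := by
  have hfold : ∀ (segs : List (List Char)) (ps : List (List Char)),
      segs.foldl (fun (ps : List (List Char)) (seg : List Char) =>
        ps ++ [PySem.List.pyRepeat ['O'] ((PySem.Chars.count seg ['O'] : Nat) : Int) ++
               PySem.Chars.replace
                 (PySem.List.slice seg (some ((PySem.Chars.count seg ['O'] : Nat) : Int)) none)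
                 ['O'] ['.']]) ps = ps ++ segs.map pvSegT := by
    intro segs
    induction segs with
    | nil => intro ps; simp
    | cons seg rest ih =>
      intro ps
      rw [List.foldl_cons, ih]
      have hseg : PySem.List.pyRepeat ['O'] ((PySem.Chars.count seg ['O'] : Nat) : Int) ++
          PySem.Chars.replace
            (PySem.List.slice seg (some ((PySem.Chars.count seg ['O'] : Nat) : Int)) none)
            ['O'] ['.'] = pvSegT seg := by
        rw [PySem.List.pyRepeat_singleton, PySem.List.slice_from_natCast, pvReplace_eq,
          pvCount_eq]
        simp [pvSegT]
      rw [hseg]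
      simp
  rw [pvModel_run]
  simp only [update_north_alt, pvSplitOn_eq]
  congr 1
  rw [hfold (pvSplit column.toList) [], List.nil_append, pvJoin_eq]

-- ===== A-side =====

-- the loop body of A's port, named for the induction
def pvStepA (st : List Char × Int) (j : Int) : List Char × Int :=
  let col := st.1
  let lb := st.2
  let lb := if PySem.List.pyGet? col j = some '#' then j else lb
  if PySem.List.pyGet? col j = some 'O' then
    if j > lb + 1 then
      let col2 := PySem.List.slice col none (some (lb + 1)) ++ ['O'] ++
                  PySem.List.slice col (some (lb + 2)) none
      let col3 := PySem.List.slice col2 none (some j) ++ ['.'] ++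
                  PySem.List.slice col2 (some (j + 1)) none
      (col3, lb + 1)
    else (col, j)
  else (col, lb)

theorem pvRange_succ (n : Nat) :
    PySem.List.pyRange 0 ((n : Int) + 1) 1 = PySem.List.pyRange 0 (n : Int) 1 ++ [(n : Int)] := by
  rw [PySem.List.pyRange_one, PySem.List.pyRange_one]
  rw [show ((n : Int) + 1 - 0).toNat = n + 1 by omega, show ((n : Int) - 0).toNat = n by omega,
    List.range_succ]
  simp

-- A-side invariant: after n steps the column is the model's output plus the untouched tail,
-- and last_block + 1 is the model's write pointer
theorem pvA_invariant (xs : List Char) : ∀ (n : Nat), n ≤ xs.length →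
    (PySem.List.pyRange 0 (n : Int) 1).foldl pvStepA (xs, -1) =
      (((xs.take n).foldl pvStep ([], 0)).1 ++ xs.drop n,
       (((xs.take n).foldl pvStep ([], 0)).2 : Int) - 1) ∧
    ((xs.take n).foldl pvStep ([], 0)).1.length = n ∧
    ((xs.take n).foldl pvStep ([], 0)).2 ≤ n := by
  intro n
  induction n with
  | zero =>
    intro _
    have h0 : PySem.List.pyRange 0 ((0 : Nat) : Int) 1 = [] := by norm_num
    simp [h0]
  | succ n ih =>
    intro hn
    obtain ⟨heq, hlen, hw⟩ := ih (by omega)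
    have hnlt : n < xs.length := by omega
    have htake : xs.take (n + 1) = xs.take n ++ [xs[n]] :=
      List.take_succ_eq_append_getElem hnlt
    set m := (xs.take n).foldl pvStep ([], 0) with hm
    have hstep : (xs.take (n + 1)).foldl pvStep ([], 0) = pvStep m xs[n] := by
      rw [htake, List.foldl_append, List.foldl_cons, List.foldl_nil, hm]
    rw [show ((n + 1 : Nat) : Int) = (n : Int) + 1 by push_cast; ring, pvRange_succ,
      List.foldl_append, List.foldl_cons, List.foldl_nil, heq, hstep]
    have hdropn : xs.drop n = xs[n] :: xs.drop (n + 1) :=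
      List.drop_eq_getElem_cons hnlt
    have hget : PySem.List.pyGet? (m.1 ++ xs.drop n) ((n : Int)) = some xs[n] := by
      rw [PySem.List.pyGet?_natCast]
      rw [hdropn, List.getElem?_append_right (by omega)]
      simp [hlen]
    set c := xs[n] with hc
    by_cases hH : c = '#'
    · -- '#': the pointer jumps past it, column unchanged
      have hA : pvStepA (m.1 ++ xs.drop n, (m.2 : Int) - 1) ((n : Int))
          = (m.1 ++ xs.drop n, (n : Int)) := by
        simp [pvStepA, hget, hH]
      have hB : pvStep m c = (m.1 ++ [c], m.1.length + 1) := by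
        simp [pvStep, hH]
      rw [hA, hB]
      refine ⟨?_, by simp [hlen], by simp [hlen]⟩
      simp only [Prod.mk.injEq]
      refine ⟨by rw [hdropn]; simp, by simp [hlen]⟩
    · by_cases hO : c = 'O'
      · by_cases hmove : ((n : Int)) > ((m.2 : Int) - 1) + 1
        · -- the rock moves forward to index m.2
          have hm2n : m.2 < n := by omega
          have hcol2 : (m.1 ++ xs.drop n).take m.2 ++ ['O'] ++ (m.1 ++ xs.drop n).drop (m.2 + 1)
              = m.1.set m.2 'O' ++ xs.drop n := by
            rw [List.take_append_of_le_length (by omega),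
                List.drop_append_of_le_length (by omega)]
            rw [List.set_eq_take_append_cons_drop, if_pos (by omega)]
            simp
          have hlenset : (m.1.set m.2 'O').length = n := by simp [hlen]
          have htk : (m.1.set m.2 'O' ++ xs.drop n).take n = m.1.set m.2 'O' :=
            by rw [List.take_append_of_le_length (by omega)]; simp [hlenset]
          have hdr : (m.1.set m.2 'O' ++ xs.drop n).drop (n + 1) = xs.drop (n + 1) := by
            rw [hdropn, show m.1.set m.2 'O' ++ c :: xs.drop (n + 1)
                = (m.1.set m.2 'O' ++ [c]) ++ xs.drop (n + 1) by simp,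
              List.drop_append_of_le_length (by simp [hlenset])]
            simp [hlenset]
          have hA : pvStepA (m.1 ++ xs.drop n, (m.2 : Int) - 1) ((n : Int))
              = (m.1.set m.2 'O' ++ ['.'] ++ xs.drop (n + 1), (m.2 : Int)) := by
            simp only [pvStepA, hget, hO]
            rw [if_pos trivial, if_neg (show ¬ ((some 'O' : Option Char) = some '#') by decide),
              if_pos hmove]
            rw [show (m.2 : Int) - 1 + 1 = ((m.2 : Nat) : Int) by omega,
              show (m.2 : Int) - 1 + 2 = (((m.2 + 1 : Nat)) : Int) by push_cast; ring,
              show ((n : Int) + 1) = (((n + 1 : Nat)) : Int) by push_cast; ring]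
            simp only [PySem.List.slice_to_natCast, PySem.List.slice_from_natCast]
            rw [hcol2, htk, hdr]
          have hB : pvStep m c = (m.1.set m.2 'O' ++ ['.'], m.2 + 1) := by
            have hsetout : (m.1 ++ ['.']).set m.2 'O' = m.1.set m.2 'O' ++ ['.'] :=
              List.set_append_left _ _ (by omega)
            simp [pvStep, hH, hO, hsetout]
          rw [hA, hB]
          refine ⟨?_, by simp [hlenset], by simp; omega⟩
          simp only [Prod.mk.injEq]
          refine ⟨by simp, by push_cast; omega⟩
        · -- the rock is already at the write pointer
          have hmeq : m.2 = n := by omega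
          have hA : pvStepA (m.1 ++ xs.drop n, (m.2 : Int) - 1) ((n : Int))
              = (m.1 ++ xs.drop n, (n : Int)) := by
            simp only [pvStepA, hget, hO]
            rw [if_pos trivial, if_neg (show ¬ ((some 'O' : Option Char) = some '#') by decide),
              if_neg hmove]
          have hB : pvStep m c = (m.1 ++ ['O'], m.2 + 1) := by
            have hsetout : (m.1 ++ ['.']).set m.2 'O' = m.1 ++ ['O'] := by
              rw [List.set_append_right _ _ (by omega)]
              simp [hlen, hmeq]
            simp [pvStep, hH, hO, hsetout]
          rw [hA, hB]
          refine ⟨?_, by simp [hlen], by simp; omega⟩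
          simp only [Prod.mk.injEq]
          refine ⟨by rw [hdropn, hO]; simp, by push_cast; omega⟩
      · -- inert character: nothing happens
        have hA : pvStepA (m.1 ++ xs.drop n, (m.2 : Int) - 1) ((n : Int))
            = (m.1 ++ xs.drop n, (m.2 : Int) - 1) := by
          have e1 : ¬ ((some c : Option Char) = some '#') := by simp [hH]
          have e2 : ¬ ((some c : Option Char) = some 'O') := by simp [hO]
          simp only [pvStepA, hget]
          rw [if_neg e1, if_neg e2]
        have hB : pvStep m c = (m.1 ++ [c], m.2) := by
          simp [pvStep, hH, hO]
        rw [hA, hB]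
        refine ⟨?_, by simp [hlen], by simp; omega⟩
        simp only [Prod.mk.injEq]
        refine ⟨by rw [hdropn]; simp, by simp⟩

theorem pvA_eq_model (column : String) :
    update_north column = String.mk ((column.toList.foldl pvStep ([], 0)).1) := by
  have h := (pvA_invariant column.toList column.toList.length le_rfl).1
  simp only [List.take_length, List.drop_length, List.append_nil] at h
  show String.mk ((List.foldl pvStepA (column.toList, -1)
      (PySem.List.pyRange 0 (column.toList.length : Int) 1)).1) = _
  rw [h]

-- ===== VERDICT (by name: the statement is the Claim_ definition above) =====
theorem update_north_spec : Claim_equal_update_north := by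
  intro column _
  unfold Spec_update_north
  rw [pvA_eq_model, pvAlt_eq_model]
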